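-- pv_equiv track=rewrite | github.com/yiyangxu1998/SparseEmbed | build_vocab.py | words2sparse
-- ===== SOURCE A (Python) =====
-- def words2sparse(vocab, words):
--     word_sparse = {}
--     for w in words:
--         for i,word in enumerate(vocab):
--             if word == w:
--                 if i in word_sparse:
--                     word_sparse[i] += 1
--                 else:
--                     word_sparse[i] = 1
--     return word_sparse
-- ===== SOURCE B (Python) =====
-- def words2sparse(vocab, words):
--     # inverted index: word -> list of vocab indices, built in one pass
--     pos = {}
--     for i, word in enumerate(vocab):
--         pos.setdefault(word, []).append(i)
--     # frequency table of the query words, one pass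
--     cnt = {}
--     for w in words:
--         cnt[w] = cnt.get(w, 0) + 1
--     word_sparse = {}
--     for w, c in cnt.items():
--         for i in pos.get(w, []):
--             word_sparse[i] = c
--     return word_sparse
-- ===== Notes on version B (the rewrite author's own statement) =====
-- stated objective: faster
-- what changed: Replaces A's per-query-word scan of the whole vocab with an inverted index (word->indices) and a frequency table built once, then a single pass over the distinct words.
import Mathlib
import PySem

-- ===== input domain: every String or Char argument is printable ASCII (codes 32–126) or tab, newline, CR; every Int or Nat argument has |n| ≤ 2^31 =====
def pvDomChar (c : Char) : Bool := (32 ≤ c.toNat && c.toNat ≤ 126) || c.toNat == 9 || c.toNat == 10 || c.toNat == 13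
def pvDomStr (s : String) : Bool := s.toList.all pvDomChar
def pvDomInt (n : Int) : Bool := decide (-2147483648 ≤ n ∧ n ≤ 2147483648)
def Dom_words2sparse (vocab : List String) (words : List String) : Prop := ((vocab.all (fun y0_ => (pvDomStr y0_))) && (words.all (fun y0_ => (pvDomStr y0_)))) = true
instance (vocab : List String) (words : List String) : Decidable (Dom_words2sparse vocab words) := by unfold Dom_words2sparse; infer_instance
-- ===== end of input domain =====

-- B replaces A's per-query-word scan of the whole vocab by an inverted index (word -> vocab indices)
-- plus a frequency table of the query words, each built in one pass (objective: faster).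

-- ===== PORT A =====
-- literal port of A: for each w in words, scan enumerate(vocab); on a match, increment or create word_sparse[i]
def words2sparse (vocab : List String) (words : List String) : List (Int × Int) :=
  (words.foldl (fun d w =>
    (PySem.List.enumerate vocab).foldl (fun d p =>
      if p.2 == w then
        -- 'word_sparse[i] += 1' (key present, guarded by the contains test) / 'word_sparse[i] = 1'
        if d.contains p.1 then d.insert p.1 (d.getD p.1 0 + 1) else d.insert p.1 1
      else d) d) (PySem.Dict.empty : PySem.Dict Int Int)).items

-- ===== PORT B =====
-- literal port of Source B: pos = inverted index, cnt = frequency table, then one pass over cnt.items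
def words2sparse_alt (vocab : List String) (words : List String) : List (Int × Int) :=
  let pos : PySem.Dict String (List Int) :=
    (PySem.List.enumerate vocab).foldl (fun d p => d.modify p.2 [] (· ++ [p.1])) PySem.Dict.empty
  let cnt : PySem.Dict String Int :=
    words.foldl (fun d w => d.insert w (d.getD w 0 + 1)) PySem.Dict.empty
  (cnt.items.foldl (fun d pc =>
    (pos.getD pc.1 []).foldl (fun d i => d.insert i pc.2) d) (PySem.Dict.empty : PySem.Dict Int Int)).items

-- ===== PRECONDITION & SPEC =====
def Spec_words2sparse (vocab : List String) (words : List String) (out : List (Int × Int)) : Prop := out = words2sparse_alt vocab words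
instance (vocab : List String) (words : List String) (out : List (Int × Int)) : Decidable (Spec_words2sparse vocab words out) := by unfold Spec_words2sparse; infer_instance

-- ===== CLAIM (what is proved, stated in full; the proofs are below) =====
def Claim_equal_words2sparse : Prop := ∀ (vocab : List String) (words : List String), Dom_words2sparse vocab words → Spec_words2sparse vocab words (words2sparse vocab words)

-- ===== LEMMAS AND PROOFS =====

-- the vocab indices holding word w, in increasing order (the common currency of both ports)
def idxL (vocab : List String) (w : String) : List Int :=
  ((PySem.List.enumerate vocab).filter (fun p => p.2 == w)).map (fun p => p.1)

theorem mem_idxL {vocab : List String} {w : String} {i : Int} :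
    i ∈ idxL vocab w ↔ ∃ (k : Nat) (_ : k < vocab.length), i = (k : Int) ∧ vocab[k] = w := by
  simp only [idxL, List.mem_map, List.mem_filter, PySem.List.mem_enumerate_iff]
  constructor
  · rintro ⟨p, ⟨⟨k, hk, rfl⟩, hw⟩, rfl⟩
    exact ⟨k, hk, by simp, by simpa using hw⟩
  · rintro ⟨k, hk, rfl, hw⟩
    exact ⟨((k : Int), vocab[k]), ⟨⟨k, hk, by simp⟩, by simpa using hw⟩, rfl⟩

theorem idxL_disjoint {vocab : List String} {w w' : String} {i : Int}
    (h : i ∈ idxL vocab w) (h' : i ∈ idxL vocab w') : w = w' := by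
  rcases mem_idxL.1 h with ⟨k, hk, rfl, hw⟩
  rcases mem_idxL.1 h' with ⟨k', hk', hkk, hw'⟩
  have : k = k' := by exact_mod_cast hkk
  subst this; rw [← hw, ← hw']

theorem nodup_idxL (vocab : List String) (w : String) : (idxL vocab w).Nodup := by
  have h := (PySem.List.pairwise_lt_enumerate vocab 0).filter (fun p => p.2 == w)
  unfold idxL
  exact (List.pairwise_map.2 h).imp (fun hlt => ne_of_lt hlt)

-- a fold inserting (i, c) for each i of a list, flattened over an items list
theorem nested_insert (items : List (String × Int)) (g : String → List Int) (d0 : PySem.Dict Int Int) :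
    items.foldl (fun d pc => (g pc.1).foldl (fun d i => d.insert i pc.2) d) d0
    = (items.flatMap (fun pc => (g pc.1).map (fun i => (i, pc.2)))).foldl (fun d q => d.insert q.1 q.2) d0 := by
  rw [List.foldl_flatMap]
  congr 1
  funext d pc
  rw [List.foldl_map]

-- a 0/1 indicator sum is a count
theorem sum_ite_count (l : List String) (a : String) :
    (l.map fun x => if x == a then 1 else 0).sum = l.count a := by
  induction l with
  | nil => rfl
  | cons x t ih =>
    simp only [List.map_cons, List.sum_cons, List.count_cons, ih]
    by_cases h : x = a
    · simp [h, Nat.add_comm]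
    · simp [h]

-- A's contains-guarded update is a single counting insert; the guarded scan of enumerate(vocab) is a fold over idxL
theorem stepA (w : String) (l : List (Int × String)) (d : PySem.Dict Int Int) :
    l.foldl (fun d p =>
      if p.2 == w then
        if d.contains p.1 then d.insert p.1 (d.getD p.1 0 + 1) else d.insert p.1 1
      else d) d
    = ((l.filter (fun p => p.2 == w)).map (fun p => p.1)).foldl (fun d i => d.insert i (d.getD i 0 + 1)) d := by
  induction l generalizing d with
  | nil => rfl
  | cons p t ih =>
    simp only [List.foldl_cons, List.filter_cons]
    by_cases h : (p.2 == w) = true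
    · simp only [h, if_pos, List.map_cons, List.foldl_cons]
      by_cases hc : d.contains p.1 = true
      · simp only [hc, if_pos]; exact ih _
      · simp only [Bool.not_eq_true] at hc
        simp only [hc, Bool.false_eq_true, if_false,
          PySem.Dict.getD_of_not_contains d 0 hc, zero_add]
        exact ih _
    · simp only [h, Bool.false_eq_true, if_false]
      exact ih _

theorem stepA_idx (vocab : List String) (w : String) (d : PySem.Dict Int Int) :
    (PySem.List.enumerate vocab).foldl (fun d p =>
      if p.2 == w then
        if d.contains p.1 then d.insert p.1 (d.getD p.1 0 + 1) else d.insert p.1 1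
      else d) d
    = (idxL vocab w).foldl (fun d i => d.insert i (d.getD i 0 + 1)) d :=
  stepA w _ d

theorem A_eq (vocab words : List String) :
    words2sparse vocab words = (PySem.Dict.counter (words.flatMap (idxL vocab))).items := by
  unfold words2sparse
  simp only [stepA_idx]
  rw [← List.foldl_flatMap, PySem.Dict.foldl_insert_getD_add_one_eq_counter]

theorem pos_getD (vocab : List String) (w : String) :
    ((PySem.List.enumerate vocab).foldl (fun d p => d.modify p.2 [] (· ++ [p.1]))
      (PySem.Dict.empty : PySem.Dict String (List Int))).getD w [] = idxL vocab w := by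
  have h : (PySem.List.enumerate vocab).foldl (fun d p => d.modify p.2 [] (· ++ [p.1]))
      (PySem.Dict.empty : PySem.Dict String (List Int))
      = ((PySem.List.enumerate vocab).map (fun p => (p.2, p.1))).foldl
          (fun d q => d.modify q.1 [] (· ++ [q.2])) PySem.Dict.empty := by
    rw [List.foldl_map]
  rw [h, PySem.Dict.getD_foldl_modify_append, List.filter_map]
  simp only [PySem.Dict.getD_empty, List.nil_append, List.map_map, idxL]
  rfl

theorem nodup_flat (vocab : List String) (words : List String) :
    ((PySem.Set.ofList words).flatMap (idxL vocab)).Nodup := by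
  refine List.nodup_flatMap.2 ⟨fun w _ => nodup_idxL vocab w, ?_⟩
  exact (PySem.Set.nodup_ofList words).imp
    (fun hne => List.disjoint_left.2 (fun _ h h' => hne (idxL_disjoint h h')))

theorem B_eq (vocab words : List String) :
    words2sparse_alt vocab words
    = (PySem.Set.ofList words).flatMap (fun w => (idxL vocab w).map (fun i => (i, (words.count w : Int)))) := by
  unfold words2sparse_alt
  simp only [PySem.Dict.foldl_insert_getD_add_one_eq_counter]
  simp only [PySem.Dict.items_counter, pos_getD]
  rw [nested_insert _ (idxL vocab)]
  rw [PySem.Dict.items_foldl_insert_fresh _ Prod.fst Prod.snd _ (fun a _ => PySem.Dict.contains_empty _)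
    (by simp only [List.flatMap_map, List.map_flatMap, List.map_map]
        simpa [Function.comp_def] using nodup_flat vocab words)]
  simp [PySem.Dict.empty, List.flatMap_map]

theorem ofList_flat (vocab : List String) (words : List String) :
    PySem.Set.ofList (words.flatMap (idxL vocab)) = (PySem.Set.ofList words).flatMap (idxL vocab) := by
  induction words using List.reverseRecOn with
  | nil => rfl
  | append_singleton ws w ih =>
    rw [List.flatMap_append, PySem.Set.ofList_append, ih, PySem.Set.ofList_append_singleton]
    by_cases hw : w ∈ ws
    · rw [PySem.Set.add_of_mem (PySem.Set.mem_ofList ws w |>.2 hw),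
        PySem.Set.update_eq_append_filter]
      have : ∀ y ∈ PySem.Set.ofList (List.flatMap (idxL vocab) [w]),
          ¬ ((!PySem.Set.contains ((PySem.Set.ofList ws).flatMap (idxL vocab)) y) = true) := by
        intro y hy
        simp only [List.flatMap_cons, List.flatMap_nil, List.append_nil] at hy
        have hy' : y ∈ idxL vocab w := (PySem.Set.mem_ofList _ _).1 hy
        simp only [Bool.not_eq_true', Bool.not_eq_false, PySem.Set.contains_eq_listContains,
          List.contains_eq_mem, decide_eq_true_eq]
        exact List.mem_flatMap.2 ⟨w, (PySem.Set.mem_ofList ws w).2 hw, hy'⟩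
      rw [List.filter_eq_nil_iff.2 this, List.append_nil]
    · rw [PySem.Set.add_of_not_mem (fun hc => hw ((PySem.Set.mem_ofList ws w).1 hc)),
        List.flatMap_append]
      simp only [List.flatMap_cons, List.flatMap_nil, List.append_nil]
      have hdisj : ∀ x ∈ List.flatMap (idxL vocab) [w], x ∉ (PySem.Set.ofList ws).flatMap (idxL vocab) := by
        intro x hx hmem
        simp only [List.flatMap_cons, List.flatMap_nil, List.append_nil] at hx
        rcases List.mem_flatMap.1 hmem with ⟨w', hw', hx'⟩
        exact hw (((idxL_disjoint hx' hx) ▸ (PySem.Set.mem_ofList ws w').1 hw'))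
      rw [PySem.Set.update_eq_append_of_disjoint _ _ (by
          simpa using nodup_idxL vocab w) (by simpa using hdisj)]

theorem count_flat (vocab : List String) (words : List String) {w : String} {i : Int}
    (hw : w ∈ words) (hi : i ∈ idxL vocab w) :
    (words.flatMap (idxL vocab)).count i = words.count w := by
  rw [List.count_flatMap]
  have hmap : words.map (List.count i ∘ idxL vocab)
      = words.map (fun w' => if (w' == w) = true then 1 else 0) := by
    apply List.map_congr_left
    intro w' _
    by_cases h : w' = w
    · subst h
      simp only [Function.comp_apply, beq_self_eq_true, if_pos]
      exact List.count_eq_one_of_mem (nodup_idxL vocab w') hi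
    · simp only [Function.comp_apply, beq_iff_eq, h, if_false]
      exact List.count_eq_zero.2 (fun hmem => h (idxL_disjoint hmem hi))
  rw [hmap, sum_ite_count]

-- ===== VERDICT (by name: the statement is the Claim_ definition above) =====
theorem words2sparse_spec : Claim_equal_words2sparse := by
  intro vocab words _
  unfold Spec_words2sparse
  rw [A_eq, B_eq, PySem.Dict.items_counter, ofList_flat, List.map_flatMap]
  apply List.flatMap_congr
  intro w hw
  apply List.map_congr_left
  intro i hi
  have hw' : w ∈ words := (PySem.Set.mem_ofList words w).1 hw
  rw [count_flat vocab words hw' hi]
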